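-- pv_equiv track=rewrite | github.com/davidflast/dyslexia | check_vowel_insertion.py | check_vowel_insertion
-- ===== SOURCE A (Python) =====
-- vowels = set(["a","e","i","o","u"])
--
-- def check_vowel_insertion(node, input):
--     node_consonants = []
--     input_consonants = []
--     for char in node:
--         if char not in vowels:
--             node_consonants.append(char)
--     for char in input:
--         if char not in vowels:
--             input_consonants.append(char)
--     return node_consonants == input_consonants
-- ===== SOURCE B (Python) =====
-- def check_vowel_insertion(node, input):
--     vowels = "aeiou"
--     i, j = 0, 0
--     while True:
--         while i < len(node) and node[i] in vowels:
--             i += 1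
--         while j < len(input) and input[j] in vowels:
--             j += 1
--         if i >= len(node) and j >= len(input):
--             return True
--         if i >= len(node) or j >= len(input):
--             return False
--         if node[i] != input[j]:
--             return False
--         i += 1
--         j += 1
-- ===== Notes on version B (the rewrite author's own statement) =====
-- stated objective: alternative
-- what changed: Replaces A's two filtering passes that build consonant lists plus a list comparison with an interleaved two-pointer scan over the original strings that allocates nothing and stops at the first mismatch.
import Mathlib
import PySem

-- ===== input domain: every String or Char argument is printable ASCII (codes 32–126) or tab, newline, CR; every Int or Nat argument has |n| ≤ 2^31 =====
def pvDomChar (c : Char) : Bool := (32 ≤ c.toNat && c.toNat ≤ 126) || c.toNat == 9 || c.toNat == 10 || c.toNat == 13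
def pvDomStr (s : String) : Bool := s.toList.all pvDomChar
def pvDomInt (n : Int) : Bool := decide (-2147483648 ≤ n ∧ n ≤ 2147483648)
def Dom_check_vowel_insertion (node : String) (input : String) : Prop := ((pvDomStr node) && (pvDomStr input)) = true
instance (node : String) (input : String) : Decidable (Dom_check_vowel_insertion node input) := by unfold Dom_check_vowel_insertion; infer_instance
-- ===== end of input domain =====

-- B replaces A's two consonant-list-building passes + list comparison with an
-- allocation-free interleaved two-pointer scan that stops at the first mismatch.

-- ===== PORT A =====
-- the module-level 'vowels' set
def pyVowels : List Char := ['a', 'e', 'i', 'o', 'u']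

def check_vowel_insertion (node : String) (input : String) : Bool :=
  -- the two for-loops appending non-vowel chars, then the list comparison
  let node_consonants :=
    node.toList.foldl (fun acc c => if pyVowels.contains c then acc else acc ++ [c]) []
  let input_consonants :=
    input.toList.foldl (fun acc c => if pyVowels.contains c then acc else acc ++ [c]) []
  node_consonants == input_consonants

-- ===== PORT B =====
def isVowelB (c : Char) : Bool := c == 'a' || c == 'e' || c == 'i' || c == 'o' || c == 'u'

-- the inner 'while … in vowels: i += 1' loops: advance past leading vowels
def skipVowels : List Char → List Char
  | [] => []
  | c :: t => if isVowelB c then skipVowels t else c :: t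

theorem skipVowels_length_le (xs : List Char) : (skipVowels xs).length ≤ xs.length := by
  induction xs with
  | nil => simp [skipVowels]
  | cons c t ih =>
    simp only [skipVowels]; split
    · simp only [List.length_cons]; omega
    · simp

-- the outer 'while True' loop over the two pointers
def twoPtr (xs ys : List Char) : Bool :=
  match hx : skipVowels xs, hy : skipVowels ys with
  | [], [] => true
  | [], _ :: _ => false
  | _ :: _, [] => false
  | a :: xs', b :: ys' => if a = b then twoPtr xs' ys' else false
termination_by xs.length + ys.length
decreasing_by
  have h1 := skipVowels_length_le xs
  have h2 := skipVowels_length_le ys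
  rw [hx] at h1; rw [hy] at h2
  simp at h1 h2; omega

def check_vowel_insertion_alt (node : String) (input : String) : Bool :=
  twoPtr node.toList input.toList

-- ===== PRECONDITION & SPEC =====
def Spec_check_vowel_insertion (node : String) (input : String) (out : Bool) : Prop := out = check_vowel_insertion_alt node input
instance (node : String) (input : String) (out : Bool) : Decidable (Spec_check_vowel_insertion node input out) := by unfold Spec_check_vowel_insertion; infer_instance

-- ===== CLAIM (what is proved, stated in full; the proofs are below) =====
def Claim_equal_check_vowel_insertion : Prop := ∀ (node : String) (input : String), Dom_check_vowel_insertion node input → Spec_check_vowel_insertion node input (check_vowel_insertion node input)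

-- ===== LEMMAS AND PROOFS =====

theorem contains_pyVowels (c : Char) : pyVowels.contains c = isVowelB c := by
  simp only [pyVowels, isVowelB, List.contains_cons, List.contains_nil, Bool.or_false]
  ac_rfl

theorem foldl_append_filter (xs : List Char) (acc : List Char) :
    xs.foldl (fun acc c => if pyVowels.contains c then acc else acc ++ [c]) acc
      = acc ++ xs.filter (fun c => !isVowelB c) := by
  induction xs generalizing acc with
  | nil => simp
  | cons c t ih =>
    have hv := contains_pyVowels c
    simp only [List.foldl_cons, List.filter_cons]
    cases h : isVowelB c
    · rw [hv.trans h]; simp only [if_neg Bool.false_ne_true, h]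
      rw [ih]; simp
    · rw [hv.trans h]; simp only [if_pos rfl, h]
      rw [ih]; simp

theorem filter_skipVowels (xs : List Char) :
    xs.filter (fun c => !isVowelB c) = (skipVowels xs).filter (fun c => !isVowelB c) := by
  induction xs with
  | nil => rfl
  | cons c t ih =>
    simp only [skipVowels, List.filter_cons]
    cases h : isVowelB c <;> simp [h, ih]

theorem head_skipVowels (xs : List Char) (a : Char) (t : List Char)
    (h : skipVowels xs = a :: t) : isVowelB a = false := by
  induction xs with
  | nil => simp [skipVowels] at h
  | cons c r ih =>
    simp only [skipVowels] at h
    split at h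
    · exact ih h
    · next hv => cases h; simpa using hv

theorem twoPtr_eq_filter (xs ys : List Char) :
    twoPtr xs ys = (xs.filter (fun c => !isVowelB c) == ys.filter (fun c => !isVowelB c)) := by
  fun_induction twoPtr xs ys with
  | case1 xs ys hx hy =>
    rw [filter_skipVowels xs, filter_skipVowels ys, hx, hy]; rfl
  | case2 xs ys b ys' hx hy =>
    rw [filter_skipVowels xs, filter_skipVowels ys, hx, hy]
    simp [List.filter_cons, head_skipVowels ys b ys' hy]
  | case3 xs ys a xs' hx hy =>
    rw [filter_skipVowels xs, filter_skipVowels ys, hx, hy]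
    simp [List.filter_cons, head_skipVowels xs a xs' hx]
  | case4 xs ys xs' b ys' hy hx ih =>
    rw [filter_skipVowels xs, filter_skipVowels ys, hx, hy]
    simp [List.filter_cons, head_skipVowels xs b xs' hx, head_skipVowels ys b ys' hy, ih]
  | case5 xs ys a xs' b ys' hx hy hab =>
    rw [filter_skipVowels xs, filter_skipVowels ys, hx, hy]
    simp [List.filter_cons, head_skipVowels xs a xs' hx, head_skipVowels ys b ys' hy, hab]

-- ===== VERDICT (by name: the statement is the Claim_ definition above) =====
theorem check_vowel_insertion_spec : Claim_equal_check_vowel_insertion := by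
  intro node input _
  unfold Spec_check_vowel_insertion check_vowel_insertion check_vowel_insertion_alt
  rw [twoPtr_eq_filter, foldl_append_filter, foldl_append_filter]
  simp
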